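-- pv_equiv track=rewrite | github.com/Fly-Eugene/Algorithm | 정올/Beginner/1339_문자삼각형2.py | chr_num
-- ===== SOURCE A (Python) =====
-- def chr_num(num):
--     num += 65
--
--     while num < 65 or num > 90:
--         if num < 65:
--             num += 26
--         elif num > 90:
--             num -= 26
--
--     return chr(num)
-- ===== SOURCE B (Python) =====
-- def chr_num(num):
--     return chr(65 + num % 26)
-- ===== Notes on version B (the rewrite author's own statement) =====
-- stated objective: simpler
-- what changed: Replaces the while-loop that repeatedly shifts num by the alphabet size until it lands in the uppercase range with the closed form chr(65 + num % 26); Python floor-mod reproduces the loop's normalization for negative and large inputs.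
import Mathlib
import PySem

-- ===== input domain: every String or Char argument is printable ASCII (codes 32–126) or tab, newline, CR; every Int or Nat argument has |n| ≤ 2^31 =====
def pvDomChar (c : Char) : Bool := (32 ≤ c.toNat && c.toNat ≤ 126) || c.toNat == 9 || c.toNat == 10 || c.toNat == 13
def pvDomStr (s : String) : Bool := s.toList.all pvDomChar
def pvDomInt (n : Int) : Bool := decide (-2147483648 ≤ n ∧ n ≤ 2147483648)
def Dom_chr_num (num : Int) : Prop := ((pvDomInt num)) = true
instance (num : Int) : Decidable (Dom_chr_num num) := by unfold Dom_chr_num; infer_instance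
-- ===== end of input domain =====

-- ===== PORT A =====
-- B replaces A's +/-26 adjustment loop with the closed form chr(65 + num % 26) (simpler, O(1)).
-- while num < 65 or num > 90: num += 26 / num -= 26   (fuel is only a totality guard; it is
-- always sufficient, so the recursion is exactly the Python loop)
def chrNumAux : Nat → Int → Int
  | 0, num => num
  | fuel + 1, num =>
    if num < 65 ∨ num > 90 then
      if num < 65 then chrNumAux fuel (num + 26) else chrNumAux fuel (num - 26)
    else num

def chr_num (num : Int) : String :=
  String.ofList [Char.ofNat (chrNumAux
    ((if num + 65 < 65 then 65 - (num + 65) else (num + 65) - 90).toNat + 1) (num + 65)).toNat]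

-- ===== PORT B =====
def chr_num_alt (num : Int) : String :=
  String.ofList [Char.ofNat (65 + PySem.Int.mod num 26).toNat]

-- ===== PRECONDITION & SPEC =====
def Spec_chr_num (num : Int) (out : String) : Prop := out = chr_num_alt num
instance (num : Int) (out : String) : Decidable (Spec_chr_num num out) := by unfold Spec_chr_num; infer_instance

-- ===== CLAIM (what is proved, stated in full; the proofs are below) =====
def Claim_equal_chr_num : Prop := ∀ (num : Int), Dom_chr_num num → Spec_chr_num num (chr_num num)

-- ===== LEMMAS AND PROOFS =====
theorem chrNumAux_eq (f : Nat) (n : Int)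
    (h : (if n < 65 then 65 - n else n - 90) < (f : Int)) :
    chrNumAux f n = 65 + (n - 65) % 26 := by
  induction f generalizing n with
  | zero => simp only [chrNumAux]; omega
  | succ f ih =>
    rw [chrNumAux]
    split
    · split
      · rw [ih]; · omega
        · split <;> omega
      · rw [ih]; · omega
        · split <;> omega
    · omega

-- ===== VERDICT (by name: the statement is the Claim_ definition above) =====
theorem chr_num_spec : Claim_equal_chr_num := by
  intro num _
  unfold Spec_chr_num chr_num chr_num_alt
  rw [chrNumAux_eq _ _ (by split <;> omega),
    PySem.Int.mod_eq_emod_of_pos (by norm_num)]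
  norm_num
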